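-- pv_equiv track=rewrite | github.com/Sixshaman/SolarTears | UtilsBuild/GenerateOGLFunctionList.py | compile_wgl_function_loader_inl
-- ===== SOURCE A (Python) =====
-- end_gl_function_loader_inl = """\
-- }"""
--
-- start_wgl_function_loader_inl = """\
-- void LoadWGLFunctionsFromContext()
-- {"""
--
-- def func_type_from_name(func_name):
-- 	return "PFN" + func_name.upper() + "PROC"
--
-- def create_function_load_declarations(func_names, use_version_indent, use_extension_indent):
-- 	cpp_declarations = ""
--
-- 	max_len = max([len(func_type_from_name(func_name)) for func_name in func_names])
-- 	for func_name in func_names: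
-- 		func_type = func_type_from_name(func_name)
--
-- 		if use_version_indent:
-- 			cpp_declarations += "\t"
--
-- 		if use_extension_indent:
-- 			cpp_declarations += "\t"
--
-- 		cpp_declarations += "LOAD_OGL_FUNCTION("
-- 		cpp_declarations += func_type
-- 		cpp_declarations += ","
-- 		cpp_declarations += (max_len - len(func_type) + 1) * ' '
-- 		cpp_declarations += func_name
-- 		cpp_declarations += ");"
-- 		cpp_declarations += "\n"
--
-- 	return cpp_declarations
--
-- def compile_wgl_function_loader_inl(funcs):
-- 	cpp_data = ""
--
-- 	cpp_data += start_wgl_function_loader_inl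
--
-- 	current_extension = ""
-- 	current_indent_functions = []
-- 	for func in funcs:
-- 		func_name      = func[0]
-- 		func_extension = func[2]
--
-- 		if func_extension != current_extension:
-- 			if current_extension != "":
-- 				cpp_data += create_function_load_declarations(current_indent_functions, False, True)
-- 				current_indent_functions.clear()
--
-- 				cpp_data += "#endif"
-- 				cpp_data += "\n"
--
-- 			current_extension = func_extension
--
-- 			if current_extension != "":
-- 				cpp_data += "\n#ifdef " + func_extension + "\n"
--
-- 		if current_extension != "":
-- 			current_indent_functions.append(func_name)
--
-- 	if current_extension != "":
-- 		cpp_data += create_function_load_declarations(current_indent_functions, False, current_extension != "")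
-- 		cpp_data += "#endif\n"
--
-- 	cpp_data += end_gl_function_loader_inl
--
-- 	return cpp_data
-- ===== SOURCE B (Python) =====
-- end_gl_function_loader_inl = """\
-- }"""
--
-- start_wgl_function_loader_inl = """\
-- void LoadWGLFunctionsFromContext()
-- {"""
--
--
-- def compile_wgl_function_loader_inl(funcs):
-- 	exts = [f[2] for f in funcs]
-- 	types = ["PFN" + f[0].upper() + "PROC" for f in funcs]
--
-- 	# Pass 1: number the contiguous runs of equal extension.
-- 	run_ids = []
-- 	r = 0
-- 	prev = None
-- 	for e in exts:
-- 		if prev is not None and e != prev: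
-- 			r += 1
-- 		run_ids.append(r)
-- 		prev = e
--
-- 	# Pass 2: alignment width per run, as a table.
-- 	width = {}
-- 	for rid, t in zip(run_ids, types):
-- 		width[rid] = max(width.get(rid, 0), len(t))
--
-- 	# Pass 3: emit each line independently; block markers come from neighbour comparison.
-- 	parts = [start_wgl_function_loader_inl]
-- 	for f, rid, t, p, nx in zip(funcs, run_ids, types, [None] + exts, exts[1:] + [None]):
-- 		e = f[2]
-- 		if not e:
-- 			continue
-- 		if p != e:
-- 			parts.append("\n#ifdef " + e + "\n")
-- 		parts.append("\tLOAD_OGL_FUNCTION(" + t + "," + " " * (width[rid] - len(t) + 1) + f[0] + ");\n")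
-- 		if nx != e:
-- 			parts.append("#endif\n")
-- 	parts.append(end_gl_function_loader_inl)
-- 	return "".join(parts)
-- ===== Notes on version B (the rewrite author's own statement) =====
-- stated objective: alternative
-- what changed: Replaces A's unbounded pending-list state machine (collect names, flush a whole #ifdef block when the extension changes, plus a terminal flush) by three staged passes: number the contiguous extension runs, precompute an alignment-width table keyed by run id, then emit each line independently with #ifdef/#endif decided purely by comparing each entry's extension with its neighbours.
import Mathlib
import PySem

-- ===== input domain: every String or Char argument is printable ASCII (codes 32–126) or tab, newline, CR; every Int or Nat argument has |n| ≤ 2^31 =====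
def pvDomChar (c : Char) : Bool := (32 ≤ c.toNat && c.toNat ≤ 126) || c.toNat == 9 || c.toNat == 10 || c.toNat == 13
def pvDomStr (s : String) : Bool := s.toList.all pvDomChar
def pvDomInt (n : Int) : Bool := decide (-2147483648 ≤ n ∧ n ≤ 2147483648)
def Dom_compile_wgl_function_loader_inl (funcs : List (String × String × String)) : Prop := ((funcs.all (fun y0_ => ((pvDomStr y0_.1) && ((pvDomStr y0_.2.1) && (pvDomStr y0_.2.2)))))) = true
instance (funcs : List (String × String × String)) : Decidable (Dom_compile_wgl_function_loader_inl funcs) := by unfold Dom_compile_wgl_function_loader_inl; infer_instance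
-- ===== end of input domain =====

-- B replaces A's pending-list/flush state machine by three staged passes: run numbering,
-- a per-run width table, and neighbour-comparison line emission (objective: alternative).
-- Both ports work on code points (List Char) and wrap with String.ofList at the boundary.

-- ===== PORT A =====

-- shared constants/helper (identical source text in Source A and Source B)
def pvStart : List Char := "void LoadWGLFunctionsFromContext()\n{".toList
def pvEnd : List Char := "}".toList

-- func_type_from_name ("PFN" + name.upper() + "PROC"; same expression appears in Source B)
def pvFuncType (n : List Char) : List Char := "PFN".toList ++ PySem.Chars.upper n ++ "PROC".toList

-- create_function_load_declarations (A's accumulator loop)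
def pvDeclsA (names : List (List Char)) (useVer useExt : Bool) : List Char :=
  let maxLen := (PySem.List.max? (names.map (fun n => (pvFuncType n).length)) (fun y => y)).getD 0
  names.foldl (fun acc n =>
    let t := pvFuncType n
    let acc := if useVer then acc ++ "\t".toList else acc
    let acc := if useExt then acc ++ "\t".toList else acc
    acc ++ "LOAD_OGL_FUNCTION(".toList ++ t ++ ",".toList
        ++ List.replicate (maxLen - t.length + 1) ' ' ++ n ++ ");".toList ++ "\n".toList) []

-- the for-loop of compile_wgl_function_loader_inl, state = (cpp_data, current_extension, current_indent_functions)
def pvLoopA : List (List Char × List Char × List Char) → List Char → List Char → List (List Char) → List Char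
  | [], cpp, cur, pend =>
      if cur ≠ [] then cpp ++ pvDeclsA pend false (decide (cur ≠ [])) ++ "#endif\n".toList else cpp
  | f :: rest, cpp, cur, pend =>
      let st :=
        if f.2.2 ≠ cur then
          let st0 := if cur ≠ [] then (cpp ++ pvDeclsA pend false true ++ "#endif\n".toList, ([] : List (List Char))) else (cpp, pend)
          let cur' := f.2.2
          let cpp' := if cur' ≠ [] then st0.1 ++ "\n#ifdef ".toList ++ f.2.2 ++ "\n".toList else st0.1
          (cpp', cur', st0.2)
        else (cpp, cur, pend)
      let pend' := if st.2.1 ≠ [] then st.2.2 ++ [f.1] else st.2.2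
      pvLoopA rest st.1 st.2.1 pend'

def compile_wgl_function_loader_inl (funcs : List (String × String × String)) : String :=
  String.ofList (pvLoopA (funcs.map (fun f => (f.1.toList, f.2.1.toList, f.2.2.toList))) pvStart [] [] ++ pvEnd)

-- ===== PORT B =====

-- Source B pass 1: number the contiguous runs of equal extension (loop appending to run_ids,
-- threading the counter r and the previous extension prev : Optional[str])
def pvRunIds (exts : List (List Char)) : List Nat :=
  (exts.foldl (fun (st : List Nat × Nat × Option (List Char)) e =>
      let r := match st.2.2 with
        | some p => if e ≠ p then st.2.1 + 1 else st.2.1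
        | none => st.2.1
      (st.1 ++ [r], r, some e))
    ([], 0, none)).1

-- Source B pass 2: alignment-width table, dict keyed by run id (width[rid] = max(width.get(rid,0), len(t)))
def pvWidths (ps : List (Nat × List Char)) : PySem.Dict Nat Nat :=
  ps.foldl (fun d p => d.insert p.1 (Nat.max (d.getD p.1 0) p.2.length)) PySem.Dict.empty

-- Source B pass 3 + assembly ('exts[1:]' is List.drop 1 — exact for this nonnegative slice;
-- '[None] + exts' zipped with funcs is none :: exts.map some, zip truncation being Python's)
def compile_wgl_function_loader_inl_alt (funcs0 : List (String × String × String)) : String :=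
  let funcs := funcs0.map (fun f => (f.1.toList, f.2.1.toList, f.2.2.toList))
  let exts := funcs.map (fun f => f.2.2)
  let types := funcs.map (fun f => pvFuncType f.1)
  let runIds := pvRunIds exts
  let width := pvWidths (runIds.zip types)
  let parts :=
    (funcs.zip (runIds.zip (types.zip ((none :: exts.map some).zip ((exts.drop 1).map some ++ [none]))))).foldl
      (fun parts q =>
        let f := q.1
        let rid := q.2.1
        let t := q.2.2.1
        let p := q.2.2.2.1
        let nx := q.2.2.2.2
        let e := f.2.2
        if e = [] then parts
        else
          let parts := if p ≠ some e then parts ++ ["\n#ifdef ".toList ++ e ++ "\n".toList] else parts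
          let parts := parts ++ ["\tLOAD_OGL_FUNCTION(".toList ++ t ++ ",".toList
            ++ List.replicate (width.getD rid 0 - t.length + 1) ' ' ++ f.1 ++ ");\n".toList]
          if nx ≠ some e then parts ++ ["#endif\n".toList] else parts)
      [pvStart]
  String.ofList (PySem.Chars.join [] (parts ++ [pvEnd]))

-- ===== PRECONDITION & SPEC =====
def Spec_compile_wgl_function_loader_inl (funcs : List (String × String × String)) (out : String) : Prop := out = compile_wgl_function_loader_inl_alt funcs
instance (funcs : List (String × String × String)) (out : String) : Decidable (Spec_compile_wgl_function_loader_inl funcs out) := by unfold Spec_compile_wgl_function_loader_inl; infer_instance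

-- ===== CLAIM (what is proved, stated in full; the proofs are below) =====
def Claim_equal_compile_wgl_function_loader_inl : Prop := ∀ (funcs : List (String × String × String)), Dom_compile_wgl_function_loader_inl funcs → Spec_compile_wgl_function_loader_inl funcs (compile_wgl_function_loader_inl funcs)

-- ===== LEMMAS AND PROOFS =====

abbrev pvF := List Char × List Char × List Char

-- join with empty separator is concatenation
theorem pvJoin_nil : ∀ parts : List (List Char), PySem.Chars.join [] parts = parts.flatten := by
  intro parts
  induction parts with
  | nil => simp [PySem.Chars.join_nil]
  | cons a t ih =>
      cases t with
      | nil => simp [PySem.Chars.join_singleton]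
      | cons b t' => simp [PySem.Chars.join_cons_cons, ih]

-- one aligned LOAD_OGL_FUNCTION line
def pvLine (w : Nat) (n : List Char) : List Char :=
  "\tLOAD_OGL_FUNCTION(".toList ++ pvFuncType n ++ ",".toList
    ++ List.replicate (w - (pvFuncType n).length + 1) ' ' ++ n ++ ");\n".toList

def pvNamesMax (names : List (List Char)) : Nat :=
  (PySem.List.max? (names.map (fun n => (pvFuncType n).length)) (fun y => y)).getD 0

-- a whole declarations block, every line aligned to the block maximum
def pvDeclsB (names : List (List Char)) : List Char :=
  (names.map (pvLine (pvNamesMax names))).flatten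

-- A's declarations loop (with A's actual flags False, True) is the flattened block
theorem pvDecls_eq (names : List (List Char)) : pvDeclsA names false true = pvDeclsB names := by
  unfold pvDeclsA pvDeclsB pvLine pvNamesMax
  simp only [Bool.false_eq_true, if_false, if_true, List.append_assoc]
  rw [PySem.List.foldl_append_eq_flatMap]
  have h1 : ("\t".toList : List Char) ++ "LOAD_OGL_FUNCTION(".toList = "\tLOAD_OGL_FUNCTION(".toList := by decide
  have h2 : (");".toList : List Char) ++ "\n".toList = ");\n".toList := by decide
  simp [List.flatMap_def, ← h1, ← h2]

-- contiguous run with key k: the names and the remainder (spec for B's grouping reasoning)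
def pvTakeRun (k : List Char) : List pvF → List (List Char) × List pvF
  | [] => ([], [])
  | f :: rest =>
      if f.2.2 = k then
        let pr := pvTakeRun k rest
        (f.1 :: pr.1, pr.2)
      else ([], f :: rest)

theorem pvTakeRun_len (k : List Char) : ∀ l, (pvTakeRun k l).2.length ≤ l.length := by
  intro l
  induction l with
  | nil => simp [pvTakeRun]
  | cons f rest ih =>
      simp only [pvTakeRun]
      split
      · exact Nat.le_succ_of_le ih
      · simp

-- one #ifdef block per nonempty-extension run: the common characterisation of both ports
def pvGroups : List pvF → List Char
  | [] => []
  | f :: rest =>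
      let pr := pvTakeRun f.2.2 rest
      (if f.2.2 = [] then []
       else "\n#ifdef ".toList ++ f.2.2 ++ "\n".toList ++ pvDeclsB (f.1 :: pr.1) ++ "#endif\n".toList)
      ++ pvGroups pr.2
termination_by l => l.length
decreasing_by
  simpa using Nat.lt_succ_of_le (pvTakeRun_len f.2.2 rest)

theorem pvTakeRun_cons_eq {f : pvF} {rest} {k : List Char}
    (hf : f.2.2 = k) : pvTakeRun k (f :: rest) = (f.1 :: (pvTakeRun k rest).1, (pvTakeRun k rest).2) := by
  simp [pvTakeRun, hf]

theorem pvTakeRun_cons_ne {f : pvF} {rest} {k : List Char}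
    (hf : f.2.2 ≠ k) : pvTakeRun k (f :: rest) = ([], f :: rest) := by
  simp [pvTakeRun, hf]

-- a run of empty-extension funcs emits nothing: skipping it head-by-head or as one group is the same
theorem pvGroups_skip (l : List pvF) :
    pvGroups (pvTakeRun [] l).2 = pvGroups l := by
  cases l with
  | nil => simp [pvTakeRun]
  | cons g gs =>
      by_cases hg : g.2.2 = []
      · rw [pvTakeRun_cons_eq hg]
        conv_rhs => rw [pvGroups]
        simp [hg]
      · rw [pvTakeRun_cons_ne hg]

theorem pvGroups_cons_nil {f : pvF} {rest}
    (hf0 : f.2.2 = []) : pvGroups (f :: rest) = pvGroups rest := by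
  rw [pvGroups]
  simp only [hf0]
  exact pvGroups_skip rest

theorem pvGroups_cons {f : pvF} {rest}
    (hf0 : f.2.2 ≠ []) : pvGroups (f :: rest) =
      "\n#ifdef ".toList ++ f.2.2 ++ "\n".toList ++ pvDeclsB (f.1 :: (pvTakeRun f.2.2 rest).1)
        ++ "#endif\n".toList ++ pvGroups (pvTakeRun f.2.2 rest).2 := by
  rw [pvGroups]
  simp [hf0, List.append_assoc]

-- A's state machine equals the run characterisation
theorem pvLoopA_eq (l : List pvF) : ∀ (cpp : List Char),
    (pvLoopA l cpp [] [] = cpp ++ pvGroups l) ∧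
    (∀ (pend : List (List Char)) (k : List Char), k ≠ [] →
      pvLoopA l cpp k pend =
        cpp ++ pvDeclsB (pend ++ (pvTakeRun k l).1) ++ "#endif\n".toList ++ pvGroups (pvTakeRun k l).2) := by
  induction l with
  | nil =>
      intro cpp
      constructor
      · simp [pvLoopA, pvGroups]
      · intro pend k hk
        simp [pvLoopA, pvTakeRun, pvGroups, hk, pvDecls_eq]
  | cons f rest ih =>
      intro cpp
      constructor
      · by_cases hf : f.2.2 = []
        · have hstep : pvLoopA (f :: rest) cpp [] [] = pvLoopA rest cpp [] [] := by
            simp [pvLoopA, hf]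
          rw [hstep, (ih cpp).1, pvGroups_cons_nil hf]
        · have hstep : pvLoopA (f :: rest) cpp [] [] =
              pvLoopA rest (cpp ++ "\n#ifdef ".toList ++ f.2.2 ++ "\n".toList) f.2.2 [f.1] := by
            simp [pvLoopA, hf]
          rw [hstep, (ih _).2 [f.1] f.2.2 hf, pvGroups_cons hf]
          simp [List.append_assoc]
      · intro pend k hk
        by_cases hf : f.2.2 = k
        · have hstep : pvLoopA (f :: rest) cpp k pend = pvLoopA rest cpp k (pend ++ [f.1]) := by
            simp [pvLoopA, hf, hk]
          rw [hstep, (ih cpp).2 (pend ++ [f.1]) k hk, pvTakeRun_cons_eq hf]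
          simp [List.append_assoc]
        · by_cases hf0 : f.2.2 = []
          · have hstep : pvLoopA (f :: rest) cpp k pend =
                pvLoopA rest (cpp ++ pvDeclsA pend false true ++ "#endif\n".toList) [] [] := by
              simp [pvLoopA, hf0, hk]
            rw [hstep, (ih _).1, pvTakeRun_cons_ne hf, pvGroups_cons_nil hf0, pvDecls_eq]
            simp [List.append_assoc]
          · have hstep : pvLoopA (f :: rest) cpp k pend =
                pvLoopA rest ((cpp ++ pvDeclsA pend false true ++ "#endif\n".toList)
                  ++ "\n#ifdef ".toList ++ f.2.2 ++ "\n".toList) f.2.2 [f.1] := by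
              simp [pvLoopA, hf, hf0, hk]
            rw [hstep, (ih _).2 [f.1] f.2.2 hf0, pvTakeRun_cons_ne hf, pvGroups_cons hf0, pvDecls_eq]
            simp [List.append_assoc]

-- ---------- B side ----------

theorem pvTakeRun_eq_while (k : List Char) : ∀ l : List pvF,
    pvTakeRun k l = ((l.takeWhile (fun g => g.2.2 == k)).map (fun g => g.1),
                     l.dropWhile (fun g => g.2.2 == k)) := by
  intro l
  induction l with
  | nil => simp [pvTakeRun]
  | cons f rest ih =>
      by_cases hf : f.2.2 = k
      · rw [pvTakeRun_cons_eq hf]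
        simp [hf, ih]
      · rw [pvTakeRun_cons_ne hf]
        simp [hf]

-- recursive form of B's pass-1 loop
def pvRIds (r : Nat) (p : Option (List Char)) : List (List Char) → List Nat
  | [] => []
  | e :: es =>
      let r' := match p with
        | some pe => if e ≠ pe then r + 1 else r
        | none => r
      r' :: pvRIds r' (some e) es

theorem pvRunIds_go : ∀ (es : List (List Char)) (acc : List Nat) (r : Nat) (p : Option (List Char)),
    (es.foldl (fun (st : List Nat × Nat × Option (List Char)) e =>
        let r := match st.2.2 with
          | some p => if e ≠ p then st.2.1 + 1 else st.2.1
          | none => st.2.1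
        (st.1 ++ [r], r, some e))
      (acc, r, p)).1 = acc ++ pvRIds r p es := by
  intro es
  induction es with
  | nil => intro acc r p; simp [pvRIds]
  | cons e es ih =>
      intro acc r p
      cases p with
      | none => simp only [List.foldl_cons, pvRIds]; rw [ih]; simp
      | some pe =>
          by_cases h : e = pe
          · simp only [List.foldl_cons, pvRIds, h]; rw [ih]; simp
          · simp only [List.foldl_cons, pvRIds, h]; rw [ih]; simp [h]

-- run-indexed ids: the j-th contiguous run of l gets id r + j
def pvS : List pvF → Nat → List Nat
  | [], _ => []
  | f :: rest, r =>
      List.replicate ((rest.takeWhile (fun g => g.2.2 == f.2.2)).length + 1) r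
        ++ pvS (rest.dropWhile (fun g => g.2.2 == f.2.2)) (r + 1)
termination_by l _ => l.length
decreasing_by
  simpa using Nat.lt_succ_of_le (List.length_dropWhile_le _ _)

theorem pvS_nil (r : Nat) : pvS [] r = [] := by rw [pvS]

theorem pvS_cons (f : pvF) (rest : List pvF) (r : Nat) :
    pvS (f :: rest) r =
      List.replicate ((rest.takeWhile (fun g => g.2.2 == f.2.2)).length + 1) r
        ++ pvS (rest.dropWhile (fun g => g.2.2 == f.2.2)) (r + 1) := by rw [pvS]

theorem pvS_mem_le : ∀ (n : Nat) (l : List pvF), l.length ≤ n → ∀ (r x : Nat), x ∈ pvS l r → r ≤ x := by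
  intro n
  induction n with
  | zero =>
      intro l hl r x hx
      have : l = [] := List.eq_nil_of_length_eq_zero (Nat.le_zero.mp hl)
      subst this; simp [pvS_nil] at hx
  | succ n ih =>
      intro l hl r x hx
      cases l with
      | nil => simp [pvS_nil] at hx
      | cons f rest =>
          rw [pvS_cons] at hx
          rcases List.mem_append.mp hx with h | h
          · exact Nat.le_of_eq (List.eq_of_mem_replicate h).symm
          · have hlen : (rest.dropWhile (fun g => g.2.2 == f.2.2)).length ≤ n :=
              le_trans (List.length_dropWhile_le _ _) (by simpa using Nat.succ_le_succ_iff.mp hl)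
            exact Nat.le_of_succ_le (ih _ hlen (r + 1) x h)

theorem pvRIds_run : ∀ (tw : List pvF) (e : List Char) (r : Nat) (tl : List (List Char)),
    (∀ g ∈ tw, g.2.2 = e) →
    pvRIds r (some e) (tw.map (fun g => g.2.2) ++ tl)
      = List.replicate tw.length r ++ pvRIds r (some e) tl := by
  intro tw
  induction tw with
  | nil => intro e r tl _; simp
  | cons g tw ih =>
      intro e r tl hall
      have hg : g.2.2 = e := hall g (by simp)
      simp only [List.map_cons, List.cons_append, pvRIds, hg]
      rw [if_neg (by simp), List.length_cons, List.replicate_succ]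
      simp only [List.cons_append, List.cons.injEq]
      exact ⟨trivial, ih e r tl (fun g hgm => hall g (by simp [hgm]))⟩

theorem pvHeadDrop {α : Type} (pd : α → Bool) (l : List α) :
    ∀ g, (l.dropWhile pd).head? = some g → pd g = false := by
  induction l with
  | nil => intro g hg; simp at hg
  | cons x xs ih =>
      intro g hg
      rw [List.dropWhile_cons] at hg
      by_cases hx : pd x = true
      · exact ih g (by simpa [hx] using hg)
      · simp [hx] at hg
        subst hg
        simpa using hx

theorem pvRIds_S : ∀ (n : Nat) (l : List pvF), l.length ≤ n → ∀ (r : Nat),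
    (pvRIds r none (l.map (fun g => g.2.2)) = pvS l r) ∧
    (∀ e : List Char, (∀ f ∈ l.head?, f.2.2 ≠ e) →
      pvRIds r (some e) (l.map (fun g => g.2.2)) = pvS l (r + 1)) := by
  intro n
  induction n with
  | zero =>
      intro l hl r
      have : l = [] := List.eq_nil_of_length_eq_zero (Nat.le_zero.mp hl)
      subst this
      exact ⟨by simp [pvRIds, pvS_nil], fun e _ => by simp [pvRIds, pvS_nil]⟩
  | succ n ih =>
      intro l hl r
      cases l with
      | nil => exact ⟨by simp [pvRIds, pvS_nil], fun e _ => by simp [pvRIds, pvS_nil]⟩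
      | cons f rest =>
          have hsplit := List.takeWhile_append_dropWhile (p := fun g => g.2.2 == f.2.2) (l := rest)
          have htw : ∀ g ∈ rest.takeWhile (fun g => g.2.2 == f.2.2), g.2.2 = f.2.2 := by
            intro g hg
            have := List.mem_takeWhile_imp hg
            simpa using this
          have hdwlen : (rest.dropWhile (fun g => g.2.2 == f.2.2)).length ≤ n :=
            le_trans (List.length_dropWhile_le _ _) (by simpa using Nat.succ_le_succ_iff.mp hl)
          have hdwhead : ∀ g ∈ (rest.dropWhile (fun g => g.2.2 == f.2.2)).head?, g.2.2 ≠ f.2.2 := by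
            intro g hg
            have := pvHeadDrop (fun g => g.2.2 == f.2.2) rest g (by simpa using hg)
            simpa using this
          -- the common development after the first id is produced
          have core : ∀ r' : Nat,
              pvRIds r' (some f.2.2) (rest.map (fun g => g.2.2))
                = List.replicate (rest.takeWhile (fun g => g.2.2 == f.2.2)).length r'
                  ++ pvS (rest.dropWhile (fun g => g.2.2 == f.2.2)) (r' + 1) := by
            intro r'
            conv_lhs => rw [← hsplit]
            rw [List.map_append, pvRIds_run _ _ _ _ htw]
            rw [(ih _ hdwlen r').2 f.2.2 hdwhead]
          constructor
          · simp only [List.map_cons, pvRIds, pvS_cons]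
            rw [core r, List.replicate_succ]
            simp
          · intro e he
            have hne : f.2.2 ≠ e := he f (by simp)
            simp only [List.map_cons, pvRIds, pvS_cons]
            rw [if_pos hne, core (r + 1), List.replicate_succ]
            simp

-- recursive form of B's pass-3 loop (mirrors the zip truncation)
def pvPartsRec (W : PySem.Dict Nat Nat) (p : Option (List Char)) : List pvF → List Nat → List (List Char)
  | [], _ => []
  | _ :: _, [] => []
  | f :: rest, rid :: rs =>
      (if f.2.2 = [] then []
       else (if p ≠ some f.2.2 then ["\n#ifdef ".toList ++ f.2.2 ++ "\n".toList] else [])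
         ++ [pvLine (W.getD rid 0) f.1]
         ++ (if (rest.head?.map (fun g => g.2.2)) ≠ some f.2.2 then ["#endif\n".toList] else []))
      ++ pvPartsRec W (some f.2.2) rest rs

theorem pvPartsRec_cons (W : PySem.Dict Nat Nat) (p : Option (List Char)) (f : pvF)
    (rest : List pvF) (rid : Nat) (rs : List Nat) :
    pvPartsRec W p (f :: rest) (rid :: rs) =
      (if f.2.2 = [] then []
       else (if p ≠ some f.2.2 then ["\n#ifdef ".toList ++ f.2.2 ++ "\n".toList] else [])
         ++ [pvLine (W.getD rid 0) f.1]
         ++ (if (rest.head?.map (fun g => g.2.2)) ≠ some f.2.2 then ["#endif\n".toList] else []))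
      ++ pvPartsRec W (some f.2.2) rest rs := by
  simp only [pvPartsRec]

theorem pvEmit_fold (W : PySem.Dict Nat Nat) :
    ∀ (funcs : List pvF) (rs : List Nat) (p : Option (List Char)) (acc : List (List Char)),
    (funcs.zip (rs.zip ((funcs.map (fun f => pvFuncType f.1)).zip
        ((p :: (funcs.map (fun f => f.2.2)).map some).zip
          (((funcs.map (fun f => f.2.2)).drop 1).map some ++ [none]))))).foldl
      (fun parts q =>
        let f := q.1
        let rid := q.2.1
        let t := q.2.2.1
        let p := q.2.2.2.1
        let nx := q.2.2.2.2
        let e := f.2.2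
        if e = [] then parts
        else
          let parts := if p ≠ some e then parts ++ ["\n#ifdef ".toList ++ e ++ "\n".toList] else parts
          let parts := parts ++ ["\tLOAD_OGL_FUNCTION(".toList ++ t ++ ",".toList
            ++ List.replicate (W.getD rid 0 - t.length + 1) ' ' ++ f.1 ++ ");\n".toList]
          if nx ≠ some e then parts ++ ["#endif\n".toList] else parts)
      acc
    = acc ++ pvPartsRec W p funcs rs := by
  intro funcs
  induction funcs with
  | nil => intro rs p acc; simp [pvPartsRec]
  | cons f rest ih =>
      intro rs p acc
      cases rs with
      | nil => simp [pvPartsRec]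
      | cons rid rs' =>
          cases rest with
          | nil =>
              have hzip : ([f].zip ((rid :: rs').zip (([f].map (fun f => pvFuncType f.1)).zip
                  ((p :: ([f].map (fun f => f.2.2)).map some).zip
                    ((([f].map (fun f => f.2.2)).drop 1).map some ++ [none])))))
                = [(f, rid, pvFuncType f.1, p, (none : Option (List Char)))] := by simp
              rw [hzip, List.foldl_cons, List.foldl_nil]
              simp only [pvPartsRec, List.head?_nil, Option.map_none]
              split_ifs <;> simp_all [pvLine, List.append_assoc, pvPartsRec]
          | cons g t =>
              have hzip : (((f :: g :: t).zip ((rid :: rs').zip (((f :: g :: t).map (fun f => pvFuncType f.1)).zip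
                  ((p :: ((f :: g :: t).map (fun f => f.2.2)).map some).zip
                    ((((f :: g :: t).map (fun f => f.2.2)).drop 1).map some ++ [none]))))))
                = (f, rid, pvFuncType f.1, p, some g.2.2)
                  :: ((g :: t).zip (rs'.zip (((g :: t).map (fun f => pvFuncType f.1)).zip
                    ((some f.2.2 :: ((g :: t).map (fun f => f.2.2)).map some).zip
                      ((((g :: t).map (fun f => f.2.2)).drop 1).map some ++ [none]))))) := by simp
              rw [hzip, List.foldl_cons, ih]
              simp only [pvPartsRec, List.head?_cons, Option.map_some]
              split_ifs <;> simp_all [pvLine, List.append_assoc]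

-- per-run width facts the emission needs about B's width table
def pvHW (W : PySem.Dict Nat Nat) : List pvF → Nat → Prop
  | [], _ => True
  | f :: rest, r =>
      (f.2.2 ≠ [] → W.getD r 0
        = pvNamesMax ((f :: rest.takeWhile (fun g => g.2.2 == f.2.2)).map (fun g => g.1)))
      ∧ pvHW W (rest.dropWhile (fun g => g.2.2 == f.2.2)) (r + 1)
termination_by l _ => l.length
decreasing_by
  simpa using Nat.lt_succ_of_le (List.length_dropWhile_le _ _)

theorem pvHW_nil (W : PySem.Dict Nat Nat) (r : Nat) : pvHW W [] r := by rw [pvHW]; trivial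

theorem pvHW_cons (W : PySem.Dict Nat Nat) (f : pvF) (rest : List pvF) (r : Nat) :
    pvHW W (f :: rest) r ↔
      ((f.2.2 ≠ [] → W.getD r 0
        = pvNamesMax ((f :: rest.takeWhile (fun g => g.2.2 == f.2.2)).map (fun g => g.1)))
      ∧ pvHW W (rest.dropWhile (fun g => g.2.2 == f.2.2)) (r + 1)) := by rw [pvHW]

-- within a run: every element after the first emits just its line; the last adds #endif
theorem pvInner (W : PySem.Dict Nat Nat) (e : List Char) (r : Nat) :
    ∀ (tw : List pvF), tw ≠ [] → (∀ g ∈ tw, g.2.2 = e) → e ≠ [] →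
    ∀ (dw : List pvF) (rs : List Nat), (dw.head?.map (fun g => g.2.2)) ≠ some e →
    pvPartsRec W (some e) (tw ++ dw) (List.replicate tw.length r ++ rs)
      = tw.map (fun g => pvLine (W.getD r 0) g.1) ++ ["#endif\n".toList] ++ pvPartsRec W (some e) dw rs := by
  intro tw
  induction tw with
  | nil => intro h; exact absurd rfl h
  | cons g tw' ih =>
      intro _ hall he dw rs hd
      have hg : g.2.2 = e := hall g (by simp)
      cases tw' with
      | nil =>
          simp only [List.length_cons, List.length_nil, List.replicate_succ, List.replicate_zero,
            List.cons_append, List.nil_append, pvPartsRec, hg]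
          rw [if_neg (by simpa using he), if_neg (by simp), if_pos hd]
          simp
      | cons g2 t2 =>
          have hg2 : g2.2.2 = e := hall g2 (by simp)
          rw [List.length_cons, List.length_cons, List.replicate_succ, List.cons_append,
            List.cons_append, List.cons_append, pvPartsRec_cons, hg]
          rw [if_neg he, if_neg (by simp), if_neg (by simp [List.head?_cons, hg2])]
          have hrec := ih (by simp) (fun x hx => hall x (by simp [hx])) he dw rs hd
          simp only [List.length_cons, List.cons_append] at hrec
          rw [hrec]
          simp [List.append_assoc]

theorem pvTWapp {α : Type} (pd : α → Bool) : ∀ (xs ys : List α),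
    (∀ x ∈ xs, pd x = true) → (∀ g, ys.head? = some g → pd g = false) →
    (xs ++ ys).takeWhile pd = xs ∧ (xs ++ ys).dropWhile pd = ys := by
  intro xs
  induction xs with
  | nil =>
      intro ys _ hy
      cases ys with
      | nil => simp
      | cons a t => simp [List.takeWhile_cons, List.dropWhile_cons, hy a rfl]
  | cons x xs ih =>
      intro ys hx hy
      have h1 := hx x (by simp)
      have h2 := ih ys (fun x hxm => hx x (by simp [hxm])) hy
      simp [List.takeWhile_cons, List.dropWhile_cons, h1, h2.1, h2.2]

theorem pvDeclsB_run (w : Nat) (f : pvF) (tw : List pvF)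
    (hw : w = pvNamesMax ((f :: tw).map (fun g => g.1))) :
    pvDeclsB (f.1 :: tw.map (fun g => g.1))
      = pvLine w f.1 ++ (tw.map (fun g => pvLine w g.1)).flatten := by
  unfold pvDeclsB
  have hnames : (f.1 :: tw.map (fun g => g.1)) = (f :: tw).map (fun g => g.1) := by simp
  rw [hnames, ← hw]
  simp [List.map_map, Function.comp_def]

theorem pvMain : ∀ (n : Nat) (l : List pvF), l.length ≤ n →
    ∀ (W : PySem.Dict Nat Nat) (r : Nat) (p : Option (List Char)),
    pvHW W l r →
    (∀ f ∈ l.head?, f.2.2 ≠ [] → p ≠ some f.2.2) →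
    (pvPartsRec W p l (pvS l r)).flatten = pvGroups l := by
  intro n
  induction n with
  | zero =>
      intro l hl W r p _ _
      have : l = [] := List.eq_nil_of_length_eq_zero (Nat.le_zero.mp hl)
      subst this
      rw [pvS_nil, pvGroups]
      simp [pvPartsRec]
  | succ n ih =>
      intro l hl W r p hw hp
      cases l with
      | nil =>
          rw [pvS_nil, pvGroups]
          simp [pvPartsRec]
      | cons f rest =>
          rw [pvS_cons, List.replicate_succ, List.cons_append]
          generalize htw : rest.takeWhile (fun g => g.2.2 == f.2.2) = tw'
          generalize hdw : rest.dropWhile (fun g => g.2.2 == f.2.2) = dw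
          have hrest : rest = tw' ++ dw := by
            rw [← htw, ← hdw, List.takeWhile_append_dropWhile]
          have htwall : ∀ g ∈ tw', g.2.2 = f.2.2 := by
            intro g hg
            rw [← htw] at hg
            simpa using List.mem_takeWhile_imp hg
          have hdwhead : ∀ g, dw.head? = some g → g.2.2 ≠ f.2.2 := by
            intro g hg
            rw [← hdw] at hg
            simpa using pvHeadDrop (fun g => g.2.2 == f.2.2) rest g hg
          have hdwheadne : (dw.head?.map (fun g => g.2.2)) ≠ some f.2.2 := by
            cases hh : dw.head? with
            | none => simp
            | some g => simp [hdwhead g hh]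
          have hw1 := (pvHW_cons W f rest r).mp hw
          rw [htw, hdw] at hw1
          have hrl : rest.length ≤ n := by simpa using Nat.succ_le_succ_iff.mp hl
          have hdwlen : dw.length ≤ n := by
            rw [← hdw]; exact le_trans (List.length_dropWhile_le _ _) hrl
          have hTR : pvTakeRun f.2.2 rest = (tw'.map (fun g => g.1), dw) := by
            rw [pvTakeRun_eq_while, htw, hdw]
          have hp2 : ∀ g ∈ dw.head?, g.2.2 ≠ [] → (some f.2.2 : Option (List Char)) ≠ some g.2.2 := by
            intro g hg hgne heq
            exact hdwhead g hg (Option.some_inj.mp heq).symm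
          by_cases hf0 : f.2.2 = []
          · -- empty extension: f emits nothing
            rw [pvGroups_cons_nil hf0]
            simp only [pvPartsRec, if_pos hf0]
            simp only [List.nil_append]
            cases htwc : tw' with
            | nil =>
                have hrest' : rest = dw := by rw [hrest, htwc, List.nil_append]
                rw [List.length_nil, List.replicate_zero, List.nil_append, hrest']
                exact ih dw hdwlen W (r + 1) (some f.2.2) hw1.2
                  (by
                    intro g hg hgne heq
                    exact hgne (by rw [← Option.some_inj.mp heq]; exact hf0))
            | cons u us =>
                have hu : u.2.2 = f.2.2 := htwall u (by rw [htwc]; simp)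
                have hrest2 : rest = u :: (us ++ dw) := by
                  rw [hrest, htwc, List.cons_append]
                have husall : ∀ x ∈ us, (fun g : pvF => g.2.2 == f.2.2) x = true := by
                  intro x hx
                  simp [htwall x (by rw [htwc]; simp [hx])]
                have hdwh : ∀ g, dw.head? = some g → (fun g : pvF => g.2.2 == f.2.2) g = false := by
                  intro g hg; simp [hdwhead g hg]
                have htwus := pvTWapp (fun g : pvF => g.2.2 == f.2.2) us dw husall hdwh
                have hpred : (fun g : pvF => g.2.2 == u.2.2) = (fun g : pvF => g.2.2 == f.2.2) := by
                  funext g; rw [hu]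
                have hSrest : pvS rest r = List.replicate (u :: us).length r ++ pvS dw (r + 1) := by
                  rw [hrest2, pvS_cons, hpred, htwus.1, htwus.2, List.length_cons]
                have hwrest : pvHW W rest r := by
                  rw [hrest2, pvHW_cons, hpred, htwus.1, htwus.2]
                  exact ⟨fun hne => absurd (hu.trans hf0) hne, hw1.2⟩
                rw [← hSrest]
                refine ih rest hrl W r (some f.2.2) hwrest ?_
                intro g hg hgne heq
                exact hgne (by rw [← Option.some_inj.mp heq]; exact hf0)
          · -- nonempty extension: f opens the block
            have hpne : p ≠ some f.2.2 := hp f (by simp) hf0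
            have hwid := hw1.1 hf0
            rw [pvGroups_cons hf0, hTR]
            simp only [pvPartsRec, if_neg hf0, if_pos hpne]
            cases htwc : tw' with
            | nil =>
                have hrest' : rest = dw := by rw [hrest, htwc, List.nil_append]
                rw [htwc] at hwid
                rw [List.length_nil, List.replicate_zero, List.nil_append, List.map_nil, hrest']
                rw [if_pos hdwheadne]
                have hrec := ih dw hdwlen W (r + 1) (some f.2.2) hw1.2 hp2
                have hdecls : pvDeclsB [f.1] = pvLine (W.getD r 0) f.1 := by
                  have h := pvDeclsB_run (W.getD r 0) f [] (by simpa using hwid)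
                  simpa using h
                rw [hdecls]
                simp [hrec, List.append_assoc]
            | cons u us =>
                have hu : u.2.2 = f.2.2 := htwall u (by rw [htwc]; simp)
                have hrest2 : rest = u :: (us ++ dw) := by
                  rw [hrest, htwc, List.cons_append]
                rw [htwc] at hwid
                have hheadrest : rest.head? = some u := by rw [hrest2]; simp
                rw [hheadrest]
                rw [if_neg (by simp [hu])]
                rw [show rest = (u :: us) ++ dw from by rw [hrest2, List.cons_append]]
                have hinner := pvInner W f.2.2 r (u :: us) (by simp)
                  (by intro g hg; exact htwall g (by rw [htwc]; exact hg)) hf0 dw (pvS dw (r + 1)) hdwheadne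
                rw [hinner]
                have hrec := ih dw hdwlen W (r + 1) (some f.2.2) hw1.2 hp2
                rw [pvDeclsB_run (W.getD r 0) f (u :: us) (by simpa using hwid)]
                simp [hrec, List.append_assoc]

-- width-table fold facts
theorem pvFW_ne : ∀ (ps : List (Nat × List Char)) (d : PySem.Dict Nat Nat) (k : Nat),
    (∀ q ∈ ps, q.1 ≠ k) →
    ((ps.foldl (fun d p => d.insert p.1 (Nat.max (d.getD p.1 0) p.2.length)) d).getD k 0) = d.getD k 0 := by
  intro ps
  induction ps with
  | nil => intro d k _; rfl
  | cons q ps ih =>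
      intro d k h
      have hq : q.1 ≠ k := h q (by simp)
      simp only [List.foldl_cons]
      rw [ih _ _ (fun q hqm => h q (by simp [hqm]))]
      rw [PySem.Dict.getD_insert]
      simp [Ne.symm hq]

theorem pvFW_eq : ∀ (ps : List (Nat × List Char)) (d : PySem.Dict Nat Nat) (k : Nat),
    (∀ q ∈ ps, q.1 = k) →
    ((ps.foldl (fun d p => d.insert p.1 (Nat.max (d.getD p.1 0) p.2.length)) d).getD k 0)
      = List.foldl Nat.max (d.getD k 0) (ps.map (fun q => q.2.length)) := by
  intro ps
  induction ps with
  | nil => intro d k _; rfl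
  | cons q ps ih =>
      intro d k h
      have hq : q.1 = k := h q (by simp)
      simp only [List.foldl_cons, List.map_cons]
      rw [ih _ _ (fun q hqm => h q (by simp [hqm]))]
      rw [PySem.Dict.getD_insert]
      simp [hq]

theorem pvMaxBridge : ∀ (ls : List Nat), List.foldl Nat.max 0 ls = (PySem.List.max? ls (fun y => y)).getD 0 := by
  intro ls
  cases ls with
  | nil => rfl
  | cons a t =>
      rw [PySem.List.max?_id_cons]
      simp

theorem pvHW_build : ∀ (n : Nat) (l : List pvF), l.length ≤ n → ∀ (r : Nat) (qs : List (Nat × List Char)),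
    (∀ q ∈ qs, q.1 < r) →
    pvHW (pvWidths (qs ++ (pvS l r).zip (l.map (fun g => pvFuncType g.1)))) l r := by
  intro n
  induction n with
  | zero =>
      intro l hl r qs hq
      have : l = [] := List.eq_nil_of_length_eq_zero (Nat.le_zero.mp hl)
      subst this
      exact pvHW_nil _ _
  | succ n ih =>
      intro l hl r qs hq
      cases l with
      | nil => exact pvHW_nil _ _
      | cons f rest =>
          have hrl : rest.length ≤ n := by simpa using Nat.succ_le_succ_iff.mp hl
          have hdwlen : (rest.dropWhile (fun g => g.2.2 == f.2.2)).length ≤ n := le_trans (List.length_dropWhile_le _ _) hrl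
          have hlist : f :: rest = (f :: (rest.takeWhile (fun g => g.2.2 == f.2.2))) ++ (rest.dropWhile (fun g => g.2.2 == f.2.2)) := by
            rw [List.cons_append, List.takeWhile_append_dropWhile]
          have hzip : (pvS (f :: rest) r).zip ((f :: rest).map (fun g : pvF => pvFuncType g.1))
              = ((List.replicate ((rest.takeWhile (fun g => g.2.2 == f.2.2)).length + 1) r).zip ((f :: (rest.takeWhile (fun g => g.2.2 == f.2.2))).map (fun g : pvF => pvFuncType g.1))) ++ ((pvS (rest.dropWhile (fun g => g.2.2 == f.2.2)) (r + 1)).zip ((rest.dropWhile (fun g => g.2.2 == f.2.2)).map (fun g : pvF => pvFuncType g.1))) := by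
            rw [pvS_cons]
            conv_lhs => rw [hlist]
            rw [List.map_append, List.zip_append (by simp)]
          rw [hzip]
          rw [pvHW_cons]
          have hassoc : qs ++ (((List.replicate ((rest.takeWhile (fun g => g.2.2 == f.2.2)).length + 1) r).zip ((f :: (rest.takeWhile (fun g => g.2.2 == f.2.2))).map (fun g : pvF => pvFuncType g.1))) ++ ((pvS (rest.dropWhile (fun g => g.2.2 == f.2.2)) (r + 1)).zip ((rest.dropWhile (fun g => g.2.2 == f.2.2)).map (fun g : pvF => pvFuncType g.1)))) = (qs ++ ((List.replicate ((rest.takeWhile (fun g => g.2.2 == f.2.2)).length + 1) r).zip ((f :: (rest.takeWhile (fun g => g.2.2 == f.2.2))).map (fun g : pvF => pvFuncType g.1)))) ++ ((pvS (rest.dropWhile (fun g => g.2.2 == f.2.2)) (r + 1)).zip ((rest.dropWhile (fun g => g.2.2 == f.2.2)).map (fun g : pvF => pvFuncType g.1))) := (List.append_assoc _ _ _).symm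
          have hBkeys : ∀ q ∈ ((pvS (rest.dropWhile (fun g => g.2.2 == f.2.2)) (r + 1)).zip ((rest.dropWhile (fun g => g.2.2 == f.2.2)).map (fun g : pvF => pvFuncType g.1))), q.1 ≠ r := by
            intro q hq2
            obtain ⟨x, y⟩ := q
            have hx := (List.of_mem_zip hq2).1
            have := pvS_mem_le (rest.dropWhile (fun g => g.2.2 == f.2.2)).length (rest.dropWhile (fun g => g.2.2 == f.2.2)) le_rfl (r + 1) x hx
            omega
          have hAkeys : ∀ q ∈ ((List.replicate ((rest.takeWhile (fun g => g.2.2 == f.2.2)).length + 1) r).zip ((f :: (rest.takeWhile (fun g => g.2.2 == f.2.2))).map (fun g : pvF => pvFuncType g.1))), q.1 = r := by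
            intro q hq2
            obtain ⟨x, y⟩ := q
            exact List.eq_of_mem_replicate (List.of_mem_zip hq2).1
          constructor
          · intro _
            rw [hassoc]
            show (pvWidths _).getD r 0 = _
            rw [pvWidths, List.foldl_append, List.foldl_append]
            rw [pvFW_ne ((pvS (rest.dropWhile (fun g => g.2.2 == f.2.2)) (r + 1)).zip ((rest.dropWhile (fun g => g.2.2 == f.2.2)).map (fun g : pvF => pvFuncType g.1))) _ r hBkeys]
            rw [pvFW_eq ((List.replicate ((rest.takeWhile (fun g => g.2.2 == f.2.2)).length + 1) r).zip ((f :: (rest.takeWhile (fun g => g.2.2 == f.2.2))).map (fun g : pvF => pvFuncType g.1))) _ r hAkeys]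
            have hqs : (qs.foldl (fun d p => d.insert p.1 (Nat.max (d.getD p.1 0) p.2.length))
                PySem.Dict.empty).getD r 0 = 0 := by
              rw [pvFW_ne qs _ r (fun q hq2 => Nat.ne_of_lt (hq q hq2))]
              exact PySem.Dict.getD_empty _ _
            rw [hqs]
            have hsnd : (((List.replicate ((rest.takeWhile (fun g => g.2.2 == f.2.2)).length + 1) r).zip ((f :: (rest.takeWhile (fun g => g.2.2 == f.2.2))).map (fun g : pvF => pvFuncType g.1))).map (fun q => q.2.length))
                = ((f :: (rest.takeWhile (fun g => g.2.2 == f.2.2))).map (fun g : pvF => pvFuncType g.1)).map List.length := by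
              rw [show (((List.replicate ((rest.takeWhile (fun g => g.2.2 == f.2.2)).length + 1) r).zip ((f :: (rest.takeWhile (fun g => g.2.2 == f.2.2))).map (fun g : pvF => pvFuncType g.1))).map (fun q => q.2.length))
                  = (((List.replicate ((rest.takeWhile (fun g => g.2.2 == f.2.2)).length + 1) r).zip ((f :: (rest.takeWhile (fun g => g.2.2 == f.2.2))).map (fun g : pvF => pvFuncType g.1))).map Prod.snd).map List.length by rw [List.map_map]; rfl]
              rw [List.map_snd_zip (by simp)]
            rw [hsnd, pvMaxBridge]
            unfold pvNamesMax
            rw [List.map_map, List.map_map]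
            rfl
          · have hqA : ∀ q ∈ qs ++ ((List.replicate ((rest.takeWhile (fun g => g.2.2 == f.2.2)).length + 1) r).zip ((f :: (rest.takeWhile (fun g => g.2.2 == f.2.2))).map (fun g : pvF => pvFuncType g.1))), q.1 < r + 1 := by
              intro q hq2
              rcases List.mem_append.mp hq2 with h | h
              · exact Nat.lt_succ_of_lt (hq q h)
              · rw [hAkeys q h]; omega
            have hres := ih (rest.dropWhile (fun g => g.2.2 == f.2.2)) hdwlen (r + 1) (qs ++ ((List.replicate ((rest.takeWhile (fun g => g.2.2 == f.2.2)).length + 1) r).zip ((f :: (rest.takeWhile (fun g => g.2.2 == f.2.2))).map (fun g : pvF => pvFuncType g.1)))) hqA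
            rw [List.append_assoc] at hres
            exact hres

-- ===== VERDICT (by name: the statement is the Claim_ definition above) =====
theorem compile_wgl_function_loader_inl_spec : Claim_equal_compile_wgl_function_loader_inl := by
  intro funcs _
  unfold Spec_compile_wgl_function_loader_inl
  unfold compile_wgl_function_loader_inl compile_wgl_function_loader_inl_alt
  rw [(pvLoopA_eq _ pvStart).1]
  simp only []
  have hrun : pvRunIds ((funcs.map (fun f => (f.1.toList, f.2.1.toList, f.2.2.toList))).map (fun f => f.2.2))
      = pvS (funcs.map (fun f => (f.1.toList, f.2.1.toList, f.2.2.toList))) 0 := by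
    unfold pvRunIds
    rw [pvRunIds_go]
    rw [(pvRIds_S _ _ le_rfl 0).1]
    simp
  rw [hrun]
  rw [pvEmit_fold]
  rw [pvJoin_nil]
  simp only [List.flatten_append, List.flatten_cons, List.flatten_nil]
  rw [pvMain (funcs.map (fun f => (f.1.toList, f.2.1.toList, f.2.2.toList))).length _ le_rfl _ 0 none
    (by simpa using pvHW_build (funcs.map (fun f => (f.1.toList, f.2.1.toList, f.2.2.toList))).length _ le_rfl 0 [] (by simp))
    (by simp)]
  simp [List.append_assoc]
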